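-- pv_equiv track=rewrite | github.com/milahu/hocr-files-template-repo | git2epub.py | git_sort_key
-- ===== SOURCE A (Python) =====
-- def git_sort_key(name_bytes):
--     """
--     Sort tree entries like git:
--     . < 0-9 < A-Z < a-z < other bytes
--     """
--     order = []
--     for b in name_bytes:
--         # ASCII ranges
--         if b == 0x2E:        # '.'
--             order.append(0)
--         elif 0x30 <= b <= 0x39:  # '0'-'9'
--             order.append(1 << 8 | b)
--         elif 0x41 <= b <= 0x5A:  # 'A'-'Z'
--             order.append(2 << 8 | b)
--         elif 0x61 <= b <= 0x7A:  # 'a'-'z'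
--             order.append(3 << 8 | b)
--         else:                  # all others
--             order.append(4 << 8 | b)
--     return tuple(order)
-- ===== SOURCE B (Python) =====
-- # Interval search: the byte categories are contiguous intervals of the integer
-- # line, so we binary-search a sorted boundary list instead of chaining range tests.
-- _BOUNDS = [0x2E, 0x2F, 0x30, 0x3A, 0x41, 0x5B, 0x61, 0x7B]
-- _CATS = [4, 0, 4, 1, 4, 2, 4, 3, 4]
--
-- def _bisect_right(a, x):
--     lo, hi = 0, len(a)
--     while lo < hi:
--         mid = (lo + hi) // 2
--         if x < a[mid]:
--             hi = mid
--         else: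
--             lo = mid + 1
--     return lo
--
-- def git_sort_key(name_bytes):
--     out = []
--     for b in name_bytes:
--         c = _CATS[_bisect_right(_BOUNDS, b)]
--         out.append(0 if c == 0 else c << 8 | b)
--     return tuple(out)
-- ===== Notes on version B (the rewrite author's own statement) =====
-- stated objective: alternative
-- what changed: The chained per-byte range tests are replaced by interval search: the categories are encoded as a sorted boundary list and each byte's category is found by a hand-written binary search (bisect_right) into a category table, then combined into the key.
import Mathlib
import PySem

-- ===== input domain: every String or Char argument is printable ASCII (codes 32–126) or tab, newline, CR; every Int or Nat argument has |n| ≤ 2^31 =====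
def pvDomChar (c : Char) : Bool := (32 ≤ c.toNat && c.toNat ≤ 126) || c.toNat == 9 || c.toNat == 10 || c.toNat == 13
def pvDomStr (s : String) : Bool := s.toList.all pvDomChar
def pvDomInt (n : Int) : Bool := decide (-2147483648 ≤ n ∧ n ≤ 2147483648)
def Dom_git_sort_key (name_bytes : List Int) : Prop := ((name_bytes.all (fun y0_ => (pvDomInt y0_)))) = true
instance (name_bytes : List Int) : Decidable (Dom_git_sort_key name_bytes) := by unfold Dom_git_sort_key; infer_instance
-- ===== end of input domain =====

-- B replaces A's chained range comparisons by a binary search over a sorted boundary list into a category table (alternative; same cost).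


-- ===== PORT A =====
-- literal port of A: fold over name_bytes appending the classified code to `order`
def git_sort_key (name_bytes : List Int) : List Int :=
  name_bytes.foldl (fun (order : List Int) (b : Int) =>
    if b = 0x2E then order ++ [0]
    else if 0x30 ≤ b ∧ b ≤ 0x39 then order ++ [Int.lor ((1:Int) <<< 8) b]
    else if 0x41 ≤ b ∧ b ≤ 0x5A then order ++ [Int.lor ((2:Int) <<< 8) b]
    else if 0x61 ≤ b ∧ b ≤ 0x7A then order ++ [Int.lor ((3:Int) <<< 8) b]
    else order ++ [Int.lor ((4:Int) <<< 8) b]) []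

-- ===== PORT B =====
-- ports of Source B's module constants _BOUNDS / _CATS
def pvBounds : List Int := [0x2E, 0x2F, 0x30, 0x3A, 0x41, 0x5B, 0x61, 0x7B]
def pvCats : List Int := [4, 0, 4, 1, 4, 2, 4, 3, 4]

-- Source B's while loop in _bisect_right, as fuel recursion (hi - lo shrinks every
-- iteration, so fuel = a.length covers every iteration the Python loop makes)
def pvBisectGo (a : List Int) (x : Int) (lo hi : Nat) : Nat → Nat
  | 0 => lo
  | fuel + 1 =>
      if lo < hi then
        let mid := (lo + hi) / 2
        if x < a.getD mid 0 then pvBisectGo a x lo mid fuel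
        else pvBisectGo a x (mid + 1) hi fuel
      else lo

-- port of Source B's _bisect_right
def pvBisectRight (a : List Int) (x : Int) : Nat :=
  pvBisectGo a x 0 a.length a.length

def git_sort_key_alt (name_bytes : List Int) : List Int :=
  name_bytes.foldl (fun (out : List Int) (b : Int) =>
    let c := pvCats.getD (pvBisectRight pvBounds b) 0
    out ++ [if c = 0 then (0 : Int) else Int.lor (c <<< 8) b]) []

-- ===== PRECONDITION & SPEC =====
def Spec_git_sort_key (name_bytes : List Int) (out : List Int) : Prop := out = git_sort_key_alt name_bytes
instance (name_bytes : List Int) (out : List Int) : Decidable (Spec_git_sort_key name_bytes out) := by unfold Spec_git_sort_key; infer_instance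

-- ===== CLAIM (what is proved, stated in full; the proofs are below) =====
def Claim_equal_git_sort_key : Prop := ∀ (name_bytes : List Int), Dom_git_sort_key name_bytes → Spec_git_sort_key name_bytes (git_sort_key name_bytes)

-- ===== LEMMAS AND PROOFS =====

-- A's per-byte classification, named for the proofs
def pvClassifyA (b : Int) : Int :=
  if b = 0x2E then 0
  else if 0x30 ≤ b ∧ b ≤ 0x39 then Int.lor ((1:Int) <<< 8) b
  else if 0x41 ≤ b ∧ b ≤ 0x5A then Int.lor ((2:Int) <<< 8) b
  else if 0x61 ≤ b ∧ b ≤ 0x7A then Int.lor ((3:Int) <<< 8) b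
  else Int.lor ((4:Int) <<< 8) b

-- B's per-byte key, named for the proofs
def pvKeyB (b : Int) : Int :=
  let c := pvCats.getD (pvBisectRight pvBounds b) 0
  if c = 0 then (0 : Int) else Int.lor (c <<< 8) b

theorem gsk_foldlA (l : List Int) (init : List Int) :
    l.foldl (fun (order : List Int) (b : Int) =>
      if b = 0x2E then order ++ [0]
      else if 0x30 ≤ b ∧ b ≤ 0x39 then order ++ [Int.lor ((1:Int) <<< 8) b]
      else if 0x41 ≤ b ∧ b ≤ 0x5A then order ++ [Int.lor ((2:Int) <<< 8) b]
      else if 0x61 ≤ b ∧ b ≤ 0x7A then order ++ [Int.lor ((3:Int) <<< 8) b]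
      else order ++ [Int.lor ((4:Int) <<< 8) b]) init = init ++ l.map pvClassifyA := by
  induction l generalizing init with
  | nil => simp
  | cons b t ih =>
      simp only [List.foldl_cons, List.map_cons, ih, pvClassifyA]
      split_ifs <;> simp

theorem gsk_foldlB (l : List Int) (init : List Int) :
    l.foldl (fun (out : List Int) (b : Int) =>
      let c := pvCats.getD (pvBisectRight pvBounds b) 0
      out ++ [if c = 0 then (0 : Int) else Int.lor (c <<< 8) b]) init = init ++ l.map pvKeyB := by
  induction l generalizing init with
  | nil => simp
  | cons b t ih => simp only [List.foldl_cons, List.map_cons, ih, pvKeyB]; simp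

-- one unfolding step of the binary search, with the midpoint and boundary precomputed
theorem gsk_step (x : Int) (lo hi fuel m : Nat) (v : Int) (hf : fuel ≠ 0)
    (hm : (lo + hi) / 2 = m) (hv : pvBounds.getD m 0 = v) (h : lo < hi) :
    pvBisectGo pvBounds x lo hi fuel =
      if x < v then pvBisectGo pvBounds x lo m (fuel - 1)
      else pvBisectGo pvBounds x (m + 1) hi (fuel - 1) := by
  cases fuel with
  | zero => omega
  | succ f => subst hm hv; simp [pvBisectGo, h]

theorem gsk_stop (x : Int) (lo fuel : Nat) : pvBisectGo pvBounds x lo lo fuel = lo := by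
  cases fuel <;> simp [pvBisectGo]

-- the binary search on the boundary list, evaluated to a decision tree
theorem gsk_bisect_eval (b : Int) : pvBisectRight pvBounds b =
    if b < 65 then
      if b < 48 then
        if b < 47 then (if b < 46 then 0 else 1) else 2
      else if b < 58 then 3 else 4
    else if b < 97 then
      if b < 91 then 5 else 6
    else if b < 123 then 7 else 8 := by
  show pvBisectGo pvBounds b 0 8 8 = _
  rw [gsk_step b 0 8 8 4 65 (by norm_num) (by norm_num) rfl (by norm_num)]
  by_cases h1 : b < 65
  · rw [if_pos h1, if_pos h1,
      gsk_step b 0 4 (8-1) 2 48 (by norm_num) (by norm_num) rfl (by norm_num)]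
    by_cases h2 : b < 48
    · rw [if_pos h2, if_pos h2,
        gsk_step b 0 2 (8-1-1) 1 47 (by norm_num) (by norm_num) rfl (by norm_num)]
      by_cases h3 : b < 47
      · rw [if_pos h3, if_pos h3,
          gsk_step b 0 1 (8-1-1-1) 0 46 (by norm_num) (by norm_num) rfl (by norm_num)]
        by_cases h4 : b < 46
        · rw [if_pos h4, if_pos h4, gsk_stop]
        · rw [if_neg h4, if_neg h4, gsk_stop]
      · rw [if_neg h3, if_neg h3, gsk_stop]
    · rw [if_neg h2, if_neg h2,
        gsk_step b 3 4 (8-1-1) 3 58 (by norm_num) (by norm_num) rfl (by norm_num)]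
      by_cases h3 : b < 58
      · rw [if_pos h3, if_pos h3, gsk_stop]
      · rw [if_neg h3, if_neg h3, gsk_stop]
  · rw [if_neg h1, if_neg h1,
      gsk_step b 5 8 (8-1) 6 97 (by norm_num) (by norm_num) rfl (by norm_num)]
    by_cases h2 : b < 97
    · rw [if_pos h2, if_pos h2,
        gsk_step b 5 6 (8-1-1) 5 91 (by norm_num) (by norm_num) rfl (by norm_num)]
      by_cases h3 : b < 91
      · rw [if_pos h3, if_pos h3, gsk_stop]
      · rw [if_neg h3, if_neg h3, gsk_stop]
    · rw [if_neg h2, if_neg h2,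
        gsk_step b (6+1) 8 (8-1-1) 7 123 (by norm_num) (by norm_num) rfl (by norm_num)]
      by_cases h3 : b < 123
      · rw [if_pos h3, if_pos h3, gsk_stop]
      · rw [if_neg h3, if_neg h3, gsk_stop]

-- pointwise: the binary-searched key equals A's chained classification
theorem gsk_key_eq (b : Int) : pvKeyB b = pvClassifyA b := by
  unfold pvKeyB pvClassifyA
  rw [gsk_bisect_eval]
  split_ifs <;> first | rfl | omega

-- ===== VERDICT (by name: the statement is the Claim_ definition above) =====
theorem git_sort_key_spec : Claim_equal_git_sort_key := by
  intro name_bytes _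
  unfold Spec_git_sort_key git_sort_key git_sort_key_alt
  rw [gsk_foldlA, gsk_foldlB, List.nil_append, List.nil_append]
  exact List.map_congr_left (fun b _ => (gsk_key_eq b).symm)
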